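-- pv_equiv track=rewrite | github.com/rf-iasys/OEIS | OEIS_A140066.py | A140066
-- ===== SOURCE A (Python) =====
-- def A140066(n):
--     marked = []
--     current = 1
--     k = 4
--
--     while len(marked) < n:
--         k += current - 4
--         current += 5
--         marked.append(k)
--
--     return marked
-- ===== SOURCE B (Python) =====
-- def A140066(n):
--     return [(5 * i * i - 11 * i + 8) // 2 for i in range(1, n + 1)]
-- ===== Notes on version B (the rewrite author's own statement) =====
-- stated objective: simpler
-- what changed: Replaced A's two-accumulator while loop with a one-line list comprehension applying the quadratic closed form of the i-th term.
import Mathlib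
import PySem

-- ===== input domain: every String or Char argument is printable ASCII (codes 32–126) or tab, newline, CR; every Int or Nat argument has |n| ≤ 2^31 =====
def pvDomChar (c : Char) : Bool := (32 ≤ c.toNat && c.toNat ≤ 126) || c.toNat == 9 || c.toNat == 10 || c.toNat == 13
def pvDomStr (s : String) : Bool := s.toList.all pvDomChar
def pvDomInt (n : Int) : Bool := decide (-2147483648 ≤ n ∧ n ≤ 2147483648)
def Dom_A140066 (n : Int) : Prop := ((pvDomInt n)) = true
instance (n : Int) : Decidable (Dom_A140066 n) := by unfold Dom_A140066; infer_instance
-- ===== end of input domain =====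

-- B replaces A's two-accumulator while loop by the closed form (5*i*i-11*i+8)//2 for i = 1..n (simpler).

-- ===== PORT A =====
-- the while loop runs exactly max(n,0) times (one append per iteration), so fuel = n.toNat
def A140066go : Nat → List Int → Int → Int → List Int
  | 0, marked, _, _ => marked
  | Nat.succ fuel, marked, current, k =>
      A140066go fuel (marked ++ [k + (current - 4)]) (current + 5) (k + (current - 4))

def A140066 (n : Int) : List Int := A140066go n.toNat [] 1 4

-- ===== PORT B =====
def A140066_alt (n : Int) : List Int :=
  (PySem.List.pyRange 1 (n + 1) 1).map
    (fun i => PySem.Int.floordiv (5 * i * i - 11 * i + 8) 2)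

-- ===== PRECONDITION & SPEC =====
def Spec_A140066 (n : Int) (out : List Int) : Prop := out = A140066_alt n
instance (n : Int) (out : List Int) : Decidable (Spec_A140066 n out) := by unfold Spec_A140066; infer_instance

-- ===== CLAIM (what is proved, stated in full; the proofs are below) =====
def Claim_equal_A140066 : Prop := ∀ (n : Int), Dom_A140066 n → Spec_A140066 n (A140066 n)

-- ===== LEMMAS AND PROOFS =====

-- B's term function
def pvF (i : Int) : Int := PySem.Int.floordiv (5 * i * i - 11 * i + 8) 2

theorem pvF_two_mul (i : Int) : 2 * pvF i = 5 * i * i - 11 * i + 8 := by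
  have heven : Even (5 * i * i - 11 * i + 8) := by
    have h1 : Even ((i - 1) * ((i - 1) + 1)) := Int.even_mul_succ_self (i - 1)
    obtain ⟨c, hc⟩ := h1
    exact ⟨2 * i * i - 5 * i + 4 + c, by nlinarith [hc]⟩
  obtain ⟨c, hc⟩ := heven
  have hd : PySem.Int.floordiv (5 * i * i - 11 * i + 8) 2 = (5 * i * i - 11 * i + 8) / 2 :=
    PySem.Int.floordiv_eq_ediv_of_pos (by norm_num)
  have : (5 * i * i - 11 * i + 8) / 2 = c := by
    rw [hc]; omega
  simp only [pvF, hd, this]; omega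

theorem pvF_step (i : Int) : pvF (i + 1) = pvF i + 5 * i - 3 := by
  have h1 := pvF_two_mul i
  have h2 := pvF_two_mul (i + 1)
  have hsq : (i + 1) * (i + 1) = i * i + 2 * i + 1 := by ring
  have hsq5 : 5 * (i + 1) * (i + 1) = 5 * (i * i) + 10 * i + 5 := by ring
  have h1' : 2 * pvF i = 5 * (i * i) - 11 * i + 8 := by linarith [h1, (by ring : 5 * i * i = 5 * (i * i))]
  rw [hsq5] at h2
  omega

theorem pvGo_spec (fuel : Nat) : ∀ (m : Nat) (marked : List Int),
    A140066go fuel marked (5 * (m : Int) + 1) (pvF m) =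
      marked ++ (List.range fuel).map (fun j : Nat => pvF ((m : Int) + 1 + (j : Int))) := by
  induction fuel with
  | zero => intro m marked; simp [A140066go]
  | succ fuel ih =>
    intro m marked
    have hk : pvF (m : Int) + ((5 * (m : Int) + 1) - 4) = pvF ((m : Int) + 1) := by
      rw [pvF_step]; ring
    have hc : (5 * (m : Int) + 1) + 5 = 5 * ((m + 1 : Nat) : Int) + 1 := by push_cast; ring
    have hm1 : ((m + 1 : Nat) : Int) = (m : Int) + 1 := by push_cast; ring
    simp only [A140066go, hk, hc, hm1.symm]
    rw [ih (m + 1) (marked ++ [pvF ((m + 1 : Nat) : Int)])]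
    rw [List.range_succ_eq_map]
    simp only [List.map_cons, List.map_map, List.append_assoc, List.cons_append,
      hm1]
    simp only [List.nil_append, Nat.cast_zero, add_zero]
    congr 1
    congr 1
    apply List.map_congr_left
    intro a _
    simp only [Function.comp_apply]
    congr 1
    push_cast
    ring

-- ===== VERDICT (by name: the statement is the Claim_ definition above) =====
theorem A140066_spec : Claim_equal_A140066 := by
  unfold Claim_equal_A140066
  intro n _
  unfold Spec_A140066 A140066 A140066_alt
  have h0 : pvF 0 = 4 := by decide
  have := pvGo_spec n.toNat 0 []
  simp only [Nat.cast_zero, mul_zero, zero_add, h0] at this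
  rw [this, PySem.List.pyRange_one]
  have : (n + 1 - 1).toNat = n.toNat := by omega
  rw [this, List.map_map, List.nil_append]
  apply List.map_congr_left
  intro j _
  simp only [Function.comp, pvF]
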